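-- pv_equiv track=rewrite | github.com/kradalby/kitty | kitty/layout.py | layout_dimension
-- ===== SOURCE A (Python) =====
-- def layout_dimension(start_at, length, cell_length, number_of_windows=1, border_length=0, margin_length=0, padding_length=0, left_align=False):
--     number_of_cells = length // cell_length
--     border_length += padding_length
--     space_needed_for_border = number_of_windows * 2 * border_length
--     space_needed_for_padding = number_of_windows * 2 * margin_length
--     space_needed = space_needed_for_padding + space_needed_for_border
--     extra = length - number_of_cells * cell_length
--     while extra < space_needed:
--         number_of_cells -= 1
--         extra = length - number_of_cells * cell_length
--     cells_per_window = number_of_cells // number_of_windows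
--     extra -= space_needed
--     pos = start_at
--     if not left_align:
--         pos += extra // 2
--     pos += border_length + margin_length
--     inner_length = cells_per_window * cell_length
--     window_length = 2 * (border_length + margin_length) + inner_length
--     extra = number_of_cells - (cells_per_window * number_of_windows)
--     while number_of_windows > 0:
--         number_of_windows -= 1
--         yield pos, cells_per_window + (extra if number_of_windows == 0 else 0)
--         pos += window_length
-- ===== SOURCE B (Python) =====
-- def layout_dimension(start_at, length, cell_length, number_of_windows=1, border_length=0, margin_length=0, padding_length=0, left_align=False):
--     unit = border_length + padding_length + margin_length
--     space_needed = 2 * number_of_windows * unit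
--     # closed form for the decrement loop: largest nc <= length//cell_length with length - nc*cell_length >= space_needed
--     number_of_cells = min(length // cell_length, (length - space_needed) // cell_length)
--     cells_per_window, rem = divmod(number_of_cells, number_of_windows)
--     extra = length - number_of_cells * cell_length - space_needed
--     pos = start_at + unit + (0 if left_align else extra // 2)
--     window_length = 2 * unit + cells_per_window * cell_length
--     return [(pos + i * window_length,
--              cells_per_window + (rem if i == number_of_windows - 1 else 0))
--             for i in range(number_of_windows)]
-- ===== Notes on version B (the rewrite author's own statement) =====
-- stated objective: faster
-- what changed: The decrement-until-it-fits while loop over cells is replaced by a closed-form floor-division (min of two floordivs) and the per-window yield loop by a range comprehension with pos + i*window_length, so no per-cell work remains.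
-- outside the precondition, e.g. on layout_dimension(0, 10, -3, 1, -5, 0, 0, False): A returns [(-1, -4)], B returns [(-6, -7)]; on layout_dimension(0, 10, 0, 1, 0, 0, 0, False): A raises ZeroDivisionError, B raises ZeroDivisionError; on layout_dimension(0, 10, 2, 0, 0, 0, 0, False): A raises ZeroDivisionError, B raises ZeroDivisionError
import Mathlib
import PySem

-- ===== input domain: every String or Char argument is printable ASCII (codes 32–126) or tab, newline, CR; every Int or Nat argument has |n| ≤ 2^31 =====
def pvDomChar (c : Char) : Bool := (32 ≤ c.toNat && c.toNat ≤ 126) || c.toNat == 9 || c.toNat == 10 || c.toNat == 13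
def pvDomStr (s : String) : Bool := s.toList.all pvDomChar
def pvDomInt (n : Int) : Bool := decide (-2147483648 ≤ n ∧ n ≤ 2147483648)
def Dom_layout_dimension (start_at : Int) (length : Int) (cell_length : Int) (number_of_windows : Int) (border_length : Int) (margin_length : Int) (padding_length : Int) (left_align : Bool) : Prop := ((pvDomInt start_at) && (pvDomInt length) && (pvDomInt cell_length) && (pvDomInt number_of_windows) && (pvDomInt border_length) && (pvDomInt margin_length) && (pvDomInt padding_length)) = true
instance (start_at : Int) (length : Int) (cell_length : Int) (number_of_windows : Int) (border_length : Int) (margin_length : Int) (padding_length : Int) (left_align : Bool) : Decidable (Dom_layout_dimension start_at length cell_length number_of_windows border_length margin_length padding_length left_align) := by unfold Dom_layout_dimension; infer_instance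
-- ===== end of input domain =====

-- B replaces A's decrement-until-fits loop with a closed-form floor-division (min of two
-- floordivs) and builds the window list from a range comprehension; objective: faster.


-- ===== PORT A =====
-- A's 'while extra < space_needed: number_of_cells -= 1; extra = …' loop; the '0 < cl'
-- conjunct only makes the recursion total (outside Pre_, Python A diverges or raises);
-- under Pre_ it is always true, so the loop test is exactly Python's.
def pvALoop (length cl sn nc : Int) : Int :=
  if h : 0 < cl ∧ length - nc * cl < sn then
    pvALoop length cl sn (nc - 1)
  else nc
termination_by (sn - (length - nc * cl)).toNat
decreasing_by
  have e : length - (nc - 1) * cl = length - nc * cl + cl := by ring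
  omega

-- A's final 'while number_of_windows > 0: number_of_windows -= 1; yield …; pos += …' loop.
def pvAEmit (n pos wl cpw rem : Int) : List (Int × Int) :=
  if _h : 0 < n then
    (pos, cpw + (if n - 1 = 0 then rem else 0)) :: pvAEmit (n - 1) (pos + wl) wl cpw rem
  else []
termination_by n.toNat
decreasing_by omega

def layout_dimension (start_at : Int) (length : Int) (cell_length : Int) (number_of_windows : Int) (border_length : Int) (margin_length : Int) (padding_length : Int) (left_align : Bool) : List (Int × Int) :=
  let number_of_cells0 := PySem.Int.floordiv length cell_length
  let border_length := border_length + padding_length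
  let space_needed_for_border := number_of_windows * 2 * border_length
  let space_needed_for_padding := number_of_windows * 2 * margin_length
  let space_needed := space_needed_for_padding + space_needed_for_border
  let number_of_cells := pvALoop length cell_length space_needed number_of_cells0
  let extra := length - number_of_cells * cell_length
  let cells_per_window := PySem.Int.floordiv number_of_cells number_of_windows
  let extra := extra - space_needed
  let pos := start_at
  let pos := if left_align then pos else pos + PySem.Int.floordiv extra 2
  let pos := pos + border_length + margin_length
  let inner_length := cells_per_window * cell_length
  let window_length := 2 * (border_length + margin_length) + inner_length
  let extra := number_of_cells - cells_per_window * number_of_windows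
  pvAEmit number_of_windows pos window_length cells_per_window extra

-- ===== PORT B =====
def layout_dimension_alt (start_at : Int) (length : Int) (cell_length : Int) (number_of_windows : Int) (border_length : Int) (margin_length : Int) (padding_length : Int) (left_align : Bool) : List (Int × Int) :=
  let unit := border_length + padding_length + margin_length
  let space_needed := 2 * number_of_windows * unit
  let number_of_cells := min (PySem.Int.floordiv length cell_length)
                             (PySem.Int.floordiv (length - space_needed) cell_length)
  let cells_per_window := PySem.Int.floordiv number_of_cells number_of_windows
  let rem := PySem.Int.mod number_of_cells number_of_windows
  let extra := length - number_of_cells * cell_length - space_needed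
  let pos := start_at + unit + (if left_align then 0 else PySem.Int.floordiv extra 2)
  let window_length := 2 * unit + cells_per_window * cell_length
  (PySem.List.pyRange 0 number_of_windows 1).map (fun i =>
    (pos + i * window_length, cells_per_window + (if i = number_of_windows - 1 then rem else 0)))

-- ===== PRECONDITION & SPEC =====
-- Pre_ excludes cell_length ≤ 0 (Python A raises ZeroDivisionError at 0 and, except on
-- accidental corners where the decrement loop happens to be skipped, diverges for negative
-- cell_length) and number_of_windows = 0 (A raises ZeroDivisionError).
def Pre_layout_dimension (start_at : Int) (length : Int) (cell_length : Int) (number_of_windows : Int) (border_length : Int) (margin_length : Int) (padding_length : Int) (left_align : Bool) : Prop :=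
  0 < cell_length ∧ number_of_windows ≠ 0
instance (start_at : Int) (length : Int) (cell_length : Int) (number_of_windows : Int) (border_length : Int) (margin_length : Int) (padding_length : Int) (left_align : Bool) : Decidable (Pre_layout_dimension start_at length cell_length number_of_windows border_length margin_length padding_length left_align) := by unfold Pre_layout_dimension; infer_instance

def pvWitness_layout_dimension : Int × Int × Int × Int × Int × Int × Int × Bool := (0, 100, 7, 3, 1, 1, 0, false)

def Spec_layout_dimension (start_at : Int) (length : Int) (cell_length : Int) (number_of_windows : Int) (border_length : Int) (margin_length : Int) (padding_length : Int) (left_align : Bool) (out : List (Int × Int)) : Prop := out = layout_dimension_alt start_at length cell_length number_of_windows border_length margin_length padding_length left_align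
instance (start_at : Int) (length : Int) (cell_length : Int) (number_of_windows : Int) (border_length : Int) (margin_length : Int) (padding_length : Int) (left_align : Bool) (out : List (Int × Int)) : Decidable (Spec_layout_dimension start_at length cell_length number_of_windows border_length margin_length padding_length left_align out) := by unfold Spec_layout_dimension; infer_instance

-- ===== CLAIM (what is proved, stated in full; the proofs are below) =====
def Claim_equal_layout_dimension : Prop := ∀ (start_at : Int) (length : Int) (cell_length : Int) (number_of_windows : Int) (border_length : Int) (margin_length : Int) (padding_length : Int) (left_align : Bool), Dom_layout_dimension start_at length cell_length number_of_windows border_length margin_length padding_length left_align → Pre_layout_dimension start_at length cell_length number_of_windows border_length margin_length padding_length left_align → Spec_layout_dimension start_at length cell_length number_of_windows border_length margin_length padding_length left_align (layout_dimension start_at length cell_length number_of_windows border_length margin_length padding_length left_align)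

-- ===== LEMMAS AND PROOFS =====

-- The decrement loop computes min(initial, (length - sn) // cl) when 0 < cl.
theorem pvALoop_eq (length cl sn : Int) (hcl : 0 < cl) :
    ∀ nc : Int, pvALoop length cl sn nc = min nc (PySem.Int.floordiv (length - sn) cl) := by
  intro nc
  fun_induction pvALoop length cl sn nc with
  | case1 nc h ih =>
    rw [ih]
    have hm : ¬ (nc ≤ PySem.Int.floordiv (length - sn) cl) := by
      rw [PySem.Int.le_floordiv_iff_mul_le hcl]
      have := h.2
      omega
    omega
  | case2 nc h =>
    have hcond : ¬ (length - nc * cl < sn) := fun hc => h ⟨hcl, hc⟩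
    have hm : nc ≤ PySem.Int.floordiv (length - sn) cl := by
      rw [PySem.Int.le_floordiv_iff_mul_le hcl]
      omega
    omega

-- The yield loop, unrolled to a map over range: window k sits at pos + k*wl and the last
-- window receives the remainder.
theorem pvAEmit_eq (wl cpw rem : Int) :
    ∀ (j : Nat) (pos : Int),
      pvAEmit (j : Int) pos wl cpw rem =
        (List.range j).map (fun k : Nat => ((pos + (k : Int) * wl : Int),
          (cpw + (if (k : Int) = (j : Int) - 1 then rem else 0) : Int))) := by
  intro j
  induction j with
  | zero => intro pos; rw [pvAEmit]; simp
  | succ j ih =>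
    intro pos
    rw [pvAEmit, dif_pos (show (0:Int) < ((j+1 : Nat) : Int) by exact_mod_cast Nat.succ_pos j)]
    have h1 : ((j+1 : Nat) : Int) - 1 = (j : Int) := by push_cast; ring
    rw [h1, ih (pos + wl)]
    rw [List.range_succ_eq_map, List.map_cons, List.map_map]
    refine congrArg₂ List.cons ?_ ?_
    · simp only [Nat.cast_zero, zero_mul, add_zero]
      refine congrArg₂ Prod.mk rfl (congrArg (cpw + ·) (if_congr (by omega) rfl rfl))
    · refine List.map_congr_left ?_
      intro k _
      simp only [Function.comp_apply, Prod.mk.injEq]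
      refine ⟨by push_cast; ring, congrArg (cpw + ·) (if_congr (by push_cast; omega) rfl rfl)⟩

theorem pvAEmit_neg (n pos wl cpw rem : Int) (hn : n ≤ 0) : pvAEmit n pos wl cpw rem = [] := by
  rw [pvAEmit, dif_neg (by omega)]

-- The yield loop as a map over the Python range B uses.
theorem pvAEmit_as_map (n pos wl cpw rem : Int) :
    pvAEmit n pos wl cpw rem =
      (PySem.List.pyRange 0 n 1).map (fun i => (pos + i * wl, cpw + (if i = n - 1 then rem else 0))) := by
  by_cases hpos : 0 < n
  · have hn' : n = ((n.toNat : Nat) : Int) := by omega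
    rw [PySem.List.pyRange_one, List.map_map, sub_zero]
    rw [hn', pvAEmit_eq]
    simp only [Int.toNat_natCast]
    refine List.map_congr_left ?_
    intro k _
    simp only [Function.comp_apply, zero_add]
  · rw [pvAEmit_neg n pos wl cpw rem (by omega)]
    rw [PySem.List.pyRange_one]
    have h0 : (n - 0).toNat = 0 := by omega
    rw [h0]
    simp

-- Python's a % b in terms of a // b.
theorem pvMod_eq (a b : Int) : PySem.Int.mod a b = a - PySem.Int.floordiv a b * b := by
  have := PySem.Int.floordiv_mul_add_mod a b
  omega

-- ===== VERDICT (by name: the statement is the Claim_ definition above) =====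
theorem layout_dimension_spec : Claim_equal_layout_dimension := by
  intro start_at length cl n bl ml pl la _hd hpre
  obtain ⟨hcl, _hn⟩ := hpre
  unfold Spec_layout_dimension layout_dimension layout_dimension_alt
  simp only []
  rw [show n * 2 * ml + n * 2 * (bl + pl) = 2 * n * (bl + pl + ml) by ring]
  rw [pvALoop_eq _ _ _ hcl]
  rw [pvAEmit_as_map]
  refine List.map_congr_left ?_
  intro i _
  simp only [Prod.mk.injEq]
  refine ⟨?_, ?_⟩
  · cases la <;> simp only [Bool.false_eq_true, if_false, if_true] <;> ring
  · rw [pvMod_eq]
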